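-- pv_equiv track=rewrite | github.com/vaclavsauer/adventofcode22 | script-14.py | load_cave
-- ===== SOURCE A (Python) =====
-- def extend_cave(cave, width, height):
--     current_height = len(cave)
--     current_width = len(cave[0]) if cave else 0
--     if current_height < height:
--         if current_height < height:
--             for i in range(current_height, height):
--                 cave.append(["."] * current_width)
--
--     for row in cave:
--         for i in range(current_width, width):
--             row.append(".")
--
--     return cave
--
-- def fill_rock_formation(cave, start, end):
--     cave = extend_cave(cave, max(start[0], end[0]) + 1, max(start[1], end[1]) + 1)
--     for i in range(min(start[1], end[1]), max(start[1], end[1]) + 1):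
--         cave[i][start[0]] = "#"
--     for i in range(min(start[0], end[0]), max(start[0], end[0]) + 1):
--         cave[start[1]][i] = "#"
--     return cave
--
-- def load_cave(lines, add_bottom=False):
--     cave = []
--     for line in lines:
--         rock_formations = line.split(" -> ")
--         for i in range(0, len(rock_formations) - 1):
--             first_formation = [
--                 int(coordinate) for coordinate in rock_formations[i].split(",")
--             ]
--             second_formation = [
--                 int(coordinate) for coordinate in rock_formations[i + 1].split(",")
--             ]
--             cave = fill_rock_formation(cave, first_formation, second_formation)
--     if add_bottom:
--         cave = fill_rock_formation(cave, [0, len(cave) + 1], [1000, len(cave) + 1])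
--
--     # print_cave(cave)
--     return cave
-- ===== SOURCE B (Python) =====
-- def load_cave(lines, add_bottom=False):
--     # Collect all rock cells into a set, then render the grid once at the end.
--     rocks = set()
--     for line in lines:
--         parts = line.split(" -> ")
--         if len(parts) < 2:
--             continue
--         pts = [[int(c) for c in p.split(",")] for p in parts]
--         for s, e in zip(pts, pts[1:]):
--             for y in range(min(s[1], e[1]), max(s[1], e[1]) + 1):
--                 rocks.add((s[0], y))
--             for x in range(min(s[0], e[0]), max(s[0], e[0]) + 1):
--                 rocks.add((x, s[1]))
--     if not rocks and not add_bottom: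
--         return []
--     w = max((p[0] for p in rocks), default=-1) + 1
--     h = max((p[1] for p in rocks), default=-1) + 1
--     if add_bottom:
--         floor_y = h + 1
--         for x in range(0, 1001):
--             rocks.add((x, floor_y))
--         w = max(w, 1001)
--         h = h + 2
--     return [["#" if (x, y) in rocks else "." for x in range(w)] for y in range(h)]
-- ===== Notes on version B (the rewrite author's own statement) =====
-- stated objective: idiomatic
-- what changed: B replaces A's incremental grid-growing with in-place cell mutation per segment by collecting all rock cells into a set in one parsing pass, computing the final width/height once, and rendering the grid in a single pass (avoids repeatedly re-extending and re-copying grid rows).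
-- outside the precondition, e.g. on load_cave(['-1,0 -> -1,0'], False): A raises IndexError, B returns [[]]
import Mathlib
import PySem

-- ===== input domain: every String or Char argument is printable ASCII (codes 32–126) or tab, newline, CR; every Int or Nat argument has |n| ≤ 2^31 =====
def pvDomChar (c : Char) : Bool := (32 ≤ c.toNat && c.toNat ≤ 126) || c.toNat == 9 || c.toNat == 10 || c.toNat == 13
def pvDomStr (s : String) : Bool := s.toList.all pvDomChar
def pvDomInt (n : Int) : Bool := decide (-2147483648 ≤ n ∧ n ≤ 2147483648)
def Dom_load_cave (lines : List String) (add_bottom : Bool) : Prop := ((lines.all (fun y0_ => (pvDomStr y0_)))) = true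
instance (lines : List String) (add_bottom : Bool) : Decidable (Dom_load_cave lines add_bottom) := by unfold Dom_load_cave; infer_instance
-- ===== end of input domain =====

-- B replaces A's incremental grid-growing/in-place mutation by collecting all rock cells
-- into a set in one pass and rendering the final w×h grid once (idiomatic restructuring).

-- ===== PORT A =====
def extend_cave (cave : List (List String)) (width height : Int) : List (List String) :=
  let current_height : Int := PySem.List.len cave
  let current_width : Int := if cave ≠ [] then PySem.List.len (PySem.List.pyGetD cave 0 []) else 0
  let cave1 := if current_height < height then
      (PySem.List.pyRange current_height height 1).foldl
        (fun c _ => c ++ [List.replicate current_width.toNat "."]) cave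
    else cave
  cave1.map (fun row => (PySem.List.pyRange current_width width 1).foldl (fun r _ => r ++ ["."]) row)

def fill_rock_formation (cave : List (List String)) (start e : List Int) : List (List String) :=
  let s0 := PySem.List.pyGetD start 0 0
  let s1 := PySem.List.pyGetD start 1 0
  let e0 := PySem.List.pyGetD e 0 0
  let e1 := PySem.List.pyGetD e 1 0
  let cave2 := extend_cave cave (max s0 e0 + 1) (max s1 e1 + 1)
  let cave3 := (PySem.List.pyRange (min s1 e1) (max s1 e1 + 1) 1).foldl
      (fun c i => PySem.List.pySetD c i (PySem.List.pySetD (PySem.List.pyGetD c i []) s0 "#")) cave2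
  (PySem.List.pyRange (min s0 e0) (max s0 e0 + 1) 1).foldl
      (fun c i => PySem.List.pySetD c s1 (PySem.List.pySetD (PySem.List.pyGetD c s1 []) i "#")) cave3

def parsePoint (s : String) : List Int :=
  ((PySem.Str.split? s ",").getD []).map (fun c => (PySem.Int.ofStr? c).getD 0)

def load_cave (lines : List String) (add_bottom : Bool) : List (List String) :=
  let cave := lines.foldl (fun cave line =>
      let rf := (PySem.Str.split? line " -> ").getD []
      (PySem.List.pyRange 0 (PySem.List.len rf - 1) 1).foldl (fun cave i =>
        let first := parsePoint (PySem.List.pyGetD rf i "")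
        let second := parsePoint (PySem.List.pyGetD rf (i+1) "")
        fill_rock_formation cave first second) cave) []
  if add_bottom then
    fill_rock_formation cave [0, PySem.List.len cave + 1] [1000, PySem.List.len cave + 1]
  else cave

-- ===== PORT B =====
def addSegmentB (rocks : PySem.Set (Int × Int)) (s e : List Int) : PySem.Set (Int × Int) :=
  let s0 := PySem.List.pyGetD s 0 0
  let s1 := PySem.List.pyGetD s 1 0
  let e0 := PySem.List.pyGetD e 0 0
  let e1 := PySem.List.pyGetD e 1 0
  let r := (PySem.List.pyRange (min s1 e1) (max s1 e1 + 1) 1).foldl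
      (fun r y => PySem.Set.add r (s0, y)) rocks
  (PySem.List.pyRange (min s0 e0) (max s0 e0 + 1) 1).foldl
      (fun r x => PySem.Set.add r (x, s1)) r

def renderB (rocks : PySem.Set (Int × Int)) (w h : Int) : List (List String) :=
  (PySem.List.pyRange 0 h 1).map (fun y =>
    (PySem.List.pyRange 0 w 1).map (fun x =>
      if PySem.Set.contains rocks (x, y) then "#" else "."))

def load_cave_alt (lines : List String) (add_bottom : Bool) : List (List String) :=
  let rocks : PySem.Set (Int × Int) := lines.foldl (fun rocks line =>
      let parts := (PySem.Str.split? line " -> ").getD []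
      if parts.length < 2 then rocks
      else
        let pts := parts.map parsePoint
        (pts.zip pts.tail).foldl (fun r se => addSegmentB r se.1 se.2) rocks) PySem.Set.empty
  if rocks.isEmpty && !add_bottom then []
  else
    let w := rocks.foldl (fun m p => max m p.1) (-1) + 1
    let h := rocks.foldl (fun m p => max m p.2) (-1) + 1
    if add_bottom then
      let fy := h + 1
      let rocks2 := (PySem.List.pyRange 0 1001 1).foldl (fun r x => PySem.Set.add r (x, fy)) rocks
      renderB rocks2 (max w 1001) (h + 2)
    else
      renderB rocks w h

-- ===== PRECONDITION & SPEC =====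
-- Pre_ admits exactly the well-formed scan lines of the puzzle: on a line with at least two
-- " -> "-separated points, every point must have ≥ 2 int()-parseable comma tokens (otherwise
-- Python A raises ValueError/IndexError) and its first two coordinates must be ≥ 0 (with a
-- negative coordinate A raises IndexError except when an accidental negative-index wraparound
-- into an already-built grid lets it return; such lines are outside the intended domain).
def Pre_load_cave (lines : List String) (add_bottom : Bool) : Prop :=
  ∀ line ∈ lines, 2 ≤ ((PySem.Str.split? line " -> ").getD []).length →
    ∀ p ∈ (PySem.Str.split? line " -> ").getD [],
      (∀ t ∈ (PySem.Str.split? p ",").getD [], (PySem.Int.ofStr? t).isSome) ∧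
      2 ≤ ((PySem.Str.split? p ",").getD []).length ∧
      0 ≤ (PySem.Int.ofStr? (PySem.List.pyGetD ((PySem.Str.split? p ",").getD []) 0 "")).getD 0 ∧
      0 ≤ (PySem.Int.ofStr? (PySem.List.pyGetD ((PySem.Str.split? p ",").getD []) 1 "")).getD 0
instance (lines : List String) (add_bottom : Bool) : Decidable (Pre_load_cave lines add_bottom) := by
  unfold Pre_load_cave; infer_instance

def pvWitness_load_cave : List String × Bool := (["498,4 -> 498,6 -> 496,6", "503,4 -> 502,4"], false)

def Spec_load_cave (lines : List String) (add_bottom : Bool) (out : List (List String)) : Prop := out = load_cave_alt lines add_bottom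
instance (lines : List String) (add_bottom : Bool) (out : List (List String)) : Decidable (Spec_load_cave lines add_bottom out) := by unfold Spec_load_cave; infer_instance

-- ===== CLAIM (what is proved, stated in full; the proofs are below) =====
def Claim_equal_load_cave : Prop := ∀ (lines : List String) (add_bottom : Bool), Dom_load_cave lines add_bottom → Pre_load_cave lines add_bottom → Spec_load_cave lines add_bottom (load_cave lines add_bottom)

-- ===== LEMMAS AND PROOFS =====

theorem pv_witness_ok :
    Dom_load_cave pvWitness_load_cave.1 pvWitness_load_cave.2 ∧
    Pre_load_cave pvWitness_load_cave.1 pvWitness_load_cave.2 := by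
  constructor <;> decide


-- ---- fold-max toolkit ----

def mX (R : List (Int × Int)) : Int := R.foldl (fun m p => max m p.1) (-1)
def mY (R : List (Int × Int)) : Int := R.foldl (fun m p => max m p.2) (-1)

theorem foldl_max_le_of (l : List Int) : ∀ a c : Int, a ≤ c → (∀ x ∈ l, x ≤ c) → l.foldl max a ≤ c := by
  induction l with
  | nil => intro a c h _; simpa using h
  | cons x t ih =>
    intro a c ha hl
    simp only [List.foldl_cons]
    exact ih _ _ (max_le ha (hl x (by simp))) (fun y hy => hl y (by simp [hy]))

theorem mX_mem_le (R : List (Int × Int)) (p : Int × Int) (hp : p ∈ R) : p.1 ≤ mX R := by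
  unfold mX
  rw [← List.foldl_map (f := fun p : Int × Int => p.1) (g := max)]
  exact (PySem.List.le_foldl_max _ _).2 _ (List.mem_map_of_mem hp)

theorem mY_mem_le (R : List (Int × Int)) (p : Int × Int) (hp : p ∈ R) : p.2 ≤ mY R := by
  unfold mY
  rw [← List.foldl_map (f := fun p : Int × Int => p.2) (g := max)]
  exact (PySem.List.le_foldl_max _ _).2 _ (List.mem_map_of_mem hp)

theorem neg_one_le_mX (R : List (Int × Int)) : -1 ≤ mX R := by
  unfold mX
  rw [← List.foldl_map (f := fun p : Int × Int => p.1) (g := max)]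
  exact (PySem.List.le_foldl_max _ _).1

theorem neg_one_le_mY (R : List (Int × Int)) : -1 ≤ mY R := by
  unfold mY
  rw [← List.foldl_map (f := fun p : Int × Int => p.2) (g := max)]
  exact (PySem.List.le_foldl_max _ _).1

theorem mX_le (R : List (Int × Int)) (c : Int) (hc : -1 ≤ c) (h : ∀ p ∈ R, p.1 ≤ c) : mX R ≤ c := by
  unfold mX
  rw [← List.foldl_map (f := fun p : Int × Int => p.1) (g := max)]
  exact foldl_max_le_of _ _ _ hc (by intro x hx; obtain ⟨p, hp, rfl⟩ := List.mem_map.mp hx; exact h p hp)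

theorem mY_le (R : List (Int × Int)) (c : Int) (hc : -1 ≤ c) (h : ∀ p ∈ R, p.2 ≤ c) : mY R ≤ c := by
  unfold mY
  rw [← List.foldl_map (f := fun p : Int × Int => p.2) (g := max)]
  exact foldl_max_le_of _ _ _ hc (by intro x hx; obtain ⟨p, hp, rfl⟩ := List.mem_map.mp hx; exact h p hp)

theorem mX_congr (R R' : List (Int × Int)) (h : ∀ p, p ∈ R ↔ p ∈ R') : mX R = mX R' :=
  le_antisymm
    (mX_le _ _ (neg_one_le_mX _) (fun p hp => mX_mem_le _ _ ((h p).mp hp)))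
    (mX_le _ _ (neg_one_le_mX _) (fun p hp => mX_mem_le _ _ ((h p).mpr hp)))

theorem mY_congr (R R' : List (Int × Int)) (h : ∀ p, p ∈ R ↔ p ∈ R') : mY R = mY R' :=
  le_antisymm
    (mY_le _ _ (neg_one_le_mY _) (fun p hp => mY_mem_le _ _ ((h p).mp hp)))
    (mY_le _ _ (neg_one_le_mY _) (fun p hp => mY_mem_le _ _ ((h p).mpr hp)))

-- ---- grid rendering toolkit ----

def cellP (R : List (Int × Int)) (x y : Int) : String := if (x, y) ∈ R then "#" else "."

theorem cell_contains (R : List (Int × Int)) (x y : Int) :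
    (if PySem.Set.contains R (x, y) then "#" else ".") = cellP R x y := by
  by_cases hm : (x, y) ∈ R
  · rw [cellP, if_pos hm, if_pos ((PySem.Set.contains_iff R (x, y)).mpr hm)]
  · rw [cellP, if_neg hm, if_neg (fun hc => hm ((PySem.Set.contains_iff R (x, y)).mp hc))]

theorem cellP_congr (R R' : List (Int × Int)) (x y : Int) (h : ∀ p, p ∈ R ↔ p ∈ R') :
    cellP R x y = cellP R' x y := by
  unfold cellP
  by_cases hm : (x, y) ∈ R
  · rw [if_pos hm, if_pos ((h _).mp hm)]
  · rw [if_neg hm, if_neg (fun hc => hm ((h _).mpr hc))]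

theorem renderB_length (R : List (Int × Int)) (w h : Int) : (renderB R w h).length = h.toNat := by
  simp [renderB, PySem.List.length_pyRange_one]

theorem renderB_getElem (R : List (Int × Int)) (w h : Int) (k : Nat) (hk : k < (renderB R w h).length) :
    (renderB R w h)[k] = (PySem.List.pyRange 0 w 1).map (fun x => if PySem.Set.contains R (x, (k : Int)) then "#" else ".") := by
  unfold renderB at hk ⊢
  rw [List.getElem_map, PySem.List.getElem_pyRange_one]
  simp

theorem renderB_row_length (R : List (Int × Int)) (w h : Int) (k : Nat) (hk : k < (renderB R w h).length) :
    (renderB R w h)[k].length = w.toNat := by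
  rw [renderB_getElem R w h k hk]
  simp [PySem.List.length_pyRange_one]

theorem renderB_cell (R : List (Int × Int)) (w h : Int) (k j : Nat)
    (hk : k < (renderB R w h).length) (hj : j < (renderB R w h)[k].length) :
    (renderB R w h)[k][j] = cellP R (j : Int) (k : Int) := by
  rw [List.getElem_of_eq (renderB_getElem R w h k hk) hj]
  rw [List.getElem_map, PySem.List.getElem_pyRange_one]
  simpa using cell_contains R (j : Int) (k : Int)

theorem renderB_eq_of (g : List (List String)) (R : List (Int × Int)) (w h : Int)
    (hg : g.length = h.toNat)
    (hrow : ∀ (k : Nat) (hk : k < g.length), g[k].length = w.toNat)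
    (hcell : ∀ (k j : Nat) (hk : k < g.length) (hj : j < g[k].length), g[k][j] = cellP R (j : Int) (k : Int)) :
    g = renderB R w h := by
  apply List.ext_getElem
  · rw [hg, renderB_length]
  · intro k hk hk'
    apply List.ext_getElem
    · rw [hrow k hk, renderB_row_length R w h k hk']
    · intro j hj hj'
      rw [hcell k j hk hj, renderB_cell R w h k j hk' hj']

theorem renderB_congr (R R' : List (Int × Int)) (w h : Int) (h' : ∀ p, p ∈ R ↔ p ∈ R') :
    renderB R w h = renderB R' w h := by
  apply renderB_eq_of
  · exact renderB_length R w h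
  · exact fun k hk => renderB_row_length R w h k hk
  · intro k j hk hj
    rw [renderB_cell R w h k j hk hj]
    exact cellP_congr _ _ _ _ h'


-- ---- extending the grid ----

theorem fold_append_const {α β : Type} (l : List β) (c : List α) (r : α) :
    l.foldl (fun acc _ => acc ++ [r]) c = c ++ List.replicate l.length r := by
  have h := PySem.List.foldl_append_singleton_eq_map (fun _ : β => r) l c
  rw [h, List.map_const']

theorem grow_render (R : List (Int × Int)) (w h W H : Int)
    (hw : 0 ≤ w) (hh : 0 ≤ h)
    (hR : ∀ p ∈ R, p.1 < w ∧ p.2 < h) (hW : w ≤ W) (hH : h ≤ H) :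
    ((renderB R w h ++ List.replicate (H - h).toNat (List.replicate w.toNat ".")).map
      (fun row => row ++ List.replicate (W - w).toNat ".")) = renderB R W H := by
  have hlen := renderB_length R w h
  have hglen : ((renderB R w h ++ List.replicate (H - h).toNat (List.replicate w.toNat ".")).map
      (fun row => row ++ List.replicate (W - w).toNat ".")).length = h.toNat + (H - h).toNat := by
    simp [hlen]
  apply renderB_eq_of
  · rw [hglen]; omega
  · intro k hk
    have hk' : k < h.toNat + (H - h).toNat := by rw [hglen] at hk; exact hk
    by_cases hkh : k < h.toNat
    · have e2 : ((renderB R w h ++ List.replicate (H - h).toNat (List.replicate w.toNat ".")).map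
          (fun row => row ++ List.replicate (W - w).toNat "."))[k]'hk
          = (renderB R w h)[k]'(by omega) ++ List.replicate (W - w).toNat "." := by
        rw [List.getElem_map, List.getElem_append_left (by omega)]
      rw [e2, List.length_append, renderB_row_length R w h k (by omega), List.length_replicate]
      omega
    · have e2 : ((renderB R w h ++ List.replicate (H - h).toNat (List.replicate w.toNat ".")).map
          (fun row => row ++ List.replicate (W - w).toNat "."))[k]'hk
          = List.replicate (w.toNat + (W - w).toNat) "." := by
        rw [List.getElem_map, List.getElem_append_right (by omega), List.getElem_replicate,
            List.replicate_append_replicate]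
      rw [e2, List.length_replicate]
      omega
  · intro k j hk hj
    have hk' : k < h.toNat + (H - h).toNat := by rw [hglen] at hk; exact hk
    by_cases hkh : k < h.toNat
    · have e2 : ((renderB R w h ++ List.replicate (H - h).toNat (List.replicate w.toNat ".")).map
          (fun row => row ++ List.replicate (W - w).toNat "."))[k]'hk
          = (renderB R w h)[k]'(by omega) ++ List.replicate (W - w).toNat "." := by
        rw [List.getElem_map, List.getElem_append_left (by omega)]
      have hj2 := hj
      rw [e2] at hj2
      rw [List.getElem_of_eq e2 hj]
      rw [List.length_append, renderB_row_length R w h k (by omega), List.length_replicate] at hj2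
      by_cases hjw : j < w.toNat
      · rw [List.getElem_append_left (by rw [renderB_row_length R w h k (by omega)]; omega)]
        exact renderB_cell R w h k j (by omega) (by rw [renderB_row_length R w h k (by omega)]; omega)
      · rw [List.getElem_append_right (by rw [renderB_row_length R w h k (by omega)]; omega)]
        rw [List.getElem_replicate]
        unfold cellP
        rw [if_neg]
        intro hm
        have := (hR _ hm).1
        simp only at this; omega
    · have e2 : ((renderB R w h ++ List.replicate (H - h).toNat (List.replicate w.toNat ".")).map
          (fun row => row ++ List.replicate (W - w).toNat "."))[k]'hk
          = List.replicate (w.toNat + (W - w).toNat) "." := by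
        rw [List.getElem_map, List.getElem_append_right (by omega), List.getElem_replicate,
            List.replicate_append_replicate]
      rw [List.getElem_of_eq e2 hj]
      rw [List.getElem_replicate]
      unfold cellP
      rw [if_neg]
      intro hm
      have := (hR _ hm).2
      simp only at this; omega

theorem extend_render (R : List (Int × Int)) (w h w' h' : Int)
    (hw : 0 ≤ w) (hh : 0 ≤ h) (hwh : h = 0 → w = 0)
    (hR : ∀ p ∈ R, p.1 < w ∧ p.2 < h) :
    extend_cave (renderB R w h) w' h' = renderB R (max w w') (max h h') := by
  have hlen := renderB_length R w h
  have hch : PySem.List.len (renderB R w h) = h := by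
    rw [PySem.List.len_eq, hlen, Int.toNat_of_nonneg hh]
  have hcw : (if renderB R w h ≠ [] then PySem.List.len (PySem.List.pyGetD (renderB R w h) 0 []) else 0) = w := by
    by_cases hh0 : h = 0
    · rw [if_neg (by simp [← List.length_eq_zero_iff, renderB_length, hh0])]
      exact (hwh hh0).symm
    · have h1 : 0 < h.toNat := by omega
      rw [if_pos (by simp [← List.length_pos_iff, hlen]; omega)]
      rw [PySem.List.pyGetD_eq_getElem _ _ (by omega) (by rw [hlen]; exact_mod_cast by omega)]
      rw [PySem.List.len_eq]
      simp only [Int.toNat_zero]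
      rw [renderB_row_length R w h 0 (by omega), Int.toNat_of_nonneg hw]
  unfold extend_cave
  simp only [hch, hcw]
  have hcave1 : (if h < h' then
      (PySem.List.pyRange h h' 1).foldl (fun c _ => c ++ [List.replicate w.toNat "."]) (renderB R w h)
      else renderB R w h)
      = renderB R w h ++ List.replicate (max h h' - h).toNat (List.replicate w.toNat ".") := by
    by_cases hhh : h < h'
    · rw [if_pos hhh, fold_append_const, PySem.List.length_pyRange_one]
      congr 2; omega
    · rw [if_neg hhh]
      rw [show (max h h' - h).toNat = 0 by omega]
      simp
  rw [hcave1]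
  have hrow : ∀ row : List String,
      (PySem.List.pyRange w w' 1).foldl (fun r _ => r ++ ["."]) row
        = row ++ List.replicate (max w w' - w).toNat "." := by
    intro row
    rw [fold_append_const, PySem.List.length_pyRange_one]
    congr 2; omega
  calc ((renderB R w h ++ List.replicate (max h h' - h).toNat (List.replicate w.toNat ".")).map
          (fun row => (PySem.List.pyRange w w' 1).foldl (fun r _ => r ++ ["."]) row))
      = ((renderB R w h ++ List.replicate (max h h' - h).toNat (List.replicate w.toNat ".")).map
          (fun row => row ++ List.replicate (max w w' - w).toNat ".")) := by
        apply List.map_congr_left; intro row _; exact hrow row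
    _ = renderB R (max w w') (max h h') :=
        grow_render R w h (max w w') (max h h') hw hh hR (le_max_left _ _) (le_max_left _ _)


-- ---- writing '#' cells ----

theorem cellP_append_single (R : List (Int × Int)) (x y a b : Int) :
    cellP (R ++ [(x, y)]) a b = if (a, b) = ((x : Int), (y : Int)) then "#" else cellP R a b := by
  unfold cellP
  by_cases he : ((a, b) : Int × Int) = (x, y)
  · rw [if_pos he, if_pos (List.mem_append_right _ (by simp [he]))]
  · rw [if_neg he]
    by_cases hm : ((a, b) : Int × Int) ∈ R
    · rw [if_pos (List.mem_append_left _ hm), if_pos hm]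
    · rw [if_neg (by simp [List.mem_append, hm, he]), if_neg hm]

theorem set_render (R : List (Int × Int)) (w h x y : Int)
    (hx0 : 0 ≤ x) (hx : x < w) (hy0 : 0 ≤ y) (hy : y < h) :
    PySem.List.pySetD (renderB R w h) y
      (PySem.List.pySetD (PySem.List.pyGetD (renderB R w h) y []) x "#")
    = renderB (R ++ [(x, y)]) w h := by
  have hlen := renderB_length R w h
  have hyb : y.toNat < (renderB R w h).length := by omega
  rw [PySem.List.pySetD_of_nonneg _ _ hy0,
      PySem.List.pyGetD_eq_getElem _ _ hy0 (by rw [hlen]; omega),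
      PySem.List.pySetD_of_nonneg _ _ hx0]
  apply renderB_eq_of
  · rw [List.length_set, hlen]
  · intro k hk
    rw [List.length_set] at hk
    rw [List.getElem_set]
    by_cases hky : y.toNat = k
    · rw [if_pos hky, List.length_set]
      exact renderB_row_length R w h y.toNat hyb
    · rw [if_neg hky]
      exact renderB_row_length R w h k hk
  · intro k j hk hj
    rw [List.length_set] at hk
    by_cases hky : y.toNat = k
    · have e2 : ((renderB R w h).set y.toNat ((renderB R w h)[y.toNat].set x.toNat "#"))[k]'(by rw [List.length_set]; exact hk)
          = (renderB R w h)[y.toNat].set x.toNat "#" := by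
        rw [List.getElem_set, if_pos hky]
      have hj2 := hj
      rw [e2, List.length_set] at hj2
      rw [List.getElem_of_eq e2 hj, List.getElem_set]
      by_cases hjx : x.toNat = j
      · rw [if_pos hjx, cellP_append_single, if_pos (by rw [Prod.mk.injEq]; omega)]
      · rw [if_neg hjx, cellP_append_single,
            if_neg (by intro he; apply hjx; have := congrArg Prod.fst he; simp at this; omega),
            renderB_cell R w h y.toNat j hyb (by rwa [renderB_row_length R w h y.toNat hyb] at hj2 ⊢),
            show ((y.toNat : Int) = (k : Int)) from by omega]
    · have e2 : ((renderB R w h).set y.toNat ((renderB R w h)[y.toNat].set x.toNat "#"))[k]'(by rw [List.length_set]; exact hk)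
          = (renderB R w h)[k] := by
        rw [List.getElem_set, if_neg hky]
      rw [List.getElem_of_eq e2 hj, cellP_append_single,
          if_neg (by intro he; apply hky; have := congrArg Prod.snd he; simp at this; omega)]
      exact renderB_cell R w h k j hk (by rwa [e2] at hj)

theorem setcells_render (w h : Int) :
    ∀ (cells : List (Int × Int)) (R : List (Int × Int)),
    (∀ c ∈ cells, 0 ≤ c.1 ∧ c.1 < w ∧ 0 ≤ c.2 ∧ c.2 < h) →
    cells.foldl (fun cv p => PySem.List.pySetD cv p.2 (PySem.List.pySetD (PySem.List.pyGetD cv p.2 []) p.1 "#")) (renderB R w h)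
    = renderB (R ++ cells) w h := by
  intro cells
  induction cells with
  | nil => intro R _; simp
  | cons c t ih =>
    intro R hb
    simp only [List.foldl_cons]
    obtain ⟨h1, h2, h3, h4⟩ := hb c (by simp)
    rw [set_render R w h c.1 c.2 h1 h2 h3 h4, ih (R ++ [(c.1, c.2)]) (fun d hd => hb d (by simp [hd]))]
    rw [List.append_assoc]
    rfl


-- ---- segments of rock cells ----

def segCells (s0 s1 e0 e1 : Int) : List (Int × Int) :=
  (PySem.List.pyRange (min s1 e1) (max s1 e1 + 1) 1).map (fun yv => (s0, yv))
  ++ (PySem.List.pyRange (min s0 e0) (max s0 e0 + 1) 1).map (fun xv => (xv, s1))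

theorem segCells_bounds (s0 s1 e0 e1 : Int) (hs0 : 0 ≤ s0) (hs1 : 0 ≤ s1) (he0 : 0 ≤ e0) (he1 : 0 ≤ e1) :
    ∀ p ∈ segCells s0 s1 e0 e1, (0 ≤ p.1 ∧ p.1 ≤ max s0 e0) ∧ (0 ≤ p.2 ∧ p.2 ≤ max s1 e1) := by
  intro p hp
  rcases List.mem_append.mp hp with hc | hr
  · obtain ⟨yv, hyv, rfl⟩ := List.mem_map.mp hc
    rw [PySem.List.mem_pyRange_one] at hyv
    constructor <;> constructor <;> simp <;> omega
  · obtain ⟨xv, hxv, rfl⟩ := List.mem_map.mp hr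
    rw [PySem.List.mem_pyRange_one] at hxv
    constructor <;> constructor <;> simp <;> omega

theorem segCells_mem_col (s0 s1 e0 e1 : Int) : (s0, max s1 e1) ∈ segCells s0 s1 e0 e1 := by
  apply List.mem_append_left
  exact List.mem_map.mpr ⟨max s1 e1, PySem.List.mem_pyRange_one.mpr (by omega), rfl⟩

theorem segCells_mem_row (s0 s1 e0 e1 : Int) : (max s0 e0, s1) ∈ segCells s0 s1 e0 e1 := by
  apply List.mem_append_right
  exact List.mem_map.mpr ⟨max s0 e0, PySem.List.mem_pyRange_one.mpr (by omega), rfl⟩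

theorem mX_append_seg (R : List (Int × Int)) (s0 s1 e0 e1 : Int)
    (hs0 : 0 ≤ s0) (hs1 : 0 ≤ s1) (he0 : 0 ≤ e0) (he1 : 0 ≤ e1) :
    mX (R ++ segCells s0 s1 e0 e1) = max (mX R) (max s0 e0) := by
  apply le_antisymm
  · apply mX_le
    · have := neg_one_le_mX R; omega
    · intro p hp
      rcases List.mem_append.mp hp with h1 | h2
      · have := mX_mem_le R p h1; omega
      · have := (segCells_bounds s0 s1 e0 e1 hs0 hs1 he0 he1 p h2).1.2; omega
  · apply max_le
    · exact mX_le R (mX (R ++ segCells s0 s1 e0 e1)) (neg_one_le_mX _) (fun p hp => mX_mem_le _ p (List.mem_append_left _ hp))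
    · have := mX_mem_le (R ++ segCells s0 s1 e0 e1) (max s0 e0, s1)
        (List.mem_append_right _ (segCells_mem_row s0 s1 e0 e1))
      simpa using this

theorem mY_append_seg (R : List (Int × Int)) (s0 s1 e0 e1 : Int)
    (hs0 : 0 ≤ s0) (hs1 : 0 ≤ s1) (he0 : 0 ≤ e0) (he1 : 0 ≤ e1) :
    mY (R ++ segCells s0 s1 e0 e1) = max (mY R) (max s1 e1) := by
  apply le_antisymm
  · apply mY_le
    · have := neg_one_le_mY R; omega
    · intro p hp
      rcases List.mem_append.mp hp with h1 | h2
      · have := mY_mem_le R p h1; omega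
      · have := (segCells_bounds s0 s1 e0 e1 hs0 hs1 he0 he1 p h2).2.2; omega
  · apply max_le
    · exact mY_le R (mY (R ++ segCells s0 s1 e0 e1)) (neg_one_le_mY _) (fun p hp => mY_mem_le _ p (List.mem_append_left _ hp))
    · have := mY_mem_le (R ++ segCells s0 s1 e0 e1) (s0, max s1 e1)
        (List.mem_append_right _ (segCells_mem_col s0 s1 e0 e1))
      simpa using this

theorem mem_addSegmentB (R : PySem.Set (Int × Int)) (st en : List Int) (p : Int × Int) :
    p ∈ addSegmentB R st en ↔
    p ∈ R ++ segCells (PySem.List.pyGetD st 0 0) (PySem.List.pyGetD st 1 0)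
          (PySem.List.pyGetD en 0 0) (PySem.List.pyGetD en 1 0) := by
  unfold addSegmentB segCells
  rw [PySem.Set.mem_foldl_add, PySem.Set.mem_foldl_add]
  simp only [List.mem_append, List.mem_map, eq_comm]
  rw [or_assoc]

-- ---- the fill step ----

theorem fill_render (R : List (Int × Int)) (w h : Int) (st en : List Int)
    (hw : 0 ≤ w) (hh : 0 ≤ h) (hwh : h = 0 → w = 0)
    (hR : ∀ p ∈ R, p.1 < w ∧ p.2 < h)
    (hs0 : 0 ≤ PySem.List.pyGetD st 0 0) (hs1 : 0 ≤ PySem.List.pyGetD st 1 0)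
    (he0 : 0 ≤ PySem.List.pyGetD en 0 0) (he1 : 0 ≤ PySem.List.pyGetD en 1 0) :
    fill_rock_formation (renderB R w h) st en
    = renderB (R ++ segCells (PySem.List.pyGetD st 0 0) (PySem.List.pyGetD st 1 0)
          (PySem.List.pyGetD en 0 0) (PySem.List.pyGetD en 1 0))
        (max w (max (PySem.List.pyGetD st 0 0) (PySem.List.pyGetD en 0 0) + 1))
        (max h (max (PySem.List.pyGetD st 1 0) (PySem.List.pyGetD en 1 0) + 1)) := by
  set s0 := PySem.List.pyGetD st 0 0 with hs0d
  set s1 := PySem.List.pyGetD st 1 0 with hs1d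
  set e0 := PySem.List.pyGetD en 0 0 with he0d
  set e1 := PySem.List.pyGetD en 1 0 with he1d
  unfold fill_rock_formation
  dsimp only
  rw [extend_render R w h (max s0 e0 + 1) (max s1 e1 + 1) hw hh hwh hR]
  set W := max w (max s0 e0 + 1) with hW
  set H := max h (max s1 e1 + 1) with hH
  have hcol : (PySem.List.pyRange (min s1 e1) (max s1 e1 + 1) 1).foldl
      (fun c i => PySem.List.pySetD c i (PySem.List.pySetD (PySem.List.pyGetD c i []) s0 "#")) (renderB R W H)
      = renderB (R ++ (PySem.List.pyRange (min s1 e1) (max s1 e1 + 1) 1).map (fun yv => (s0, yv))) W H := by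
    rw [← List.foldl_map (f := fun yv : Int => ((s0 : Int), yv))
        (g := fun cv (p : Int × Int) => PySem.List.pySetD cv p.2 (PySem.List.pySetD (PySem.List.pyGetD cv p.2 []) p.1 "#"))]
    apply setcells_render
    intro c hc
    obtain ⟨yv, hyv, rfl⟩ := List.mem_map.mp hc
    rw [PySem.List.mem_pyRange_one] at hyv
    refine ⟨hs0, by dsimp only; omega, by dsimp only; omega, by dsimp only; omega⟩
  rw [hcol]
  have hrow : (PySem.List.pyRange (min s0 e0) (max s0 e0 + 1) 1).foldl
      (fun c i => PySem.List.pySetD c s1 (PySem.List.pySetD (PySem.List.pyGetD c s1 []) i "#"))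
      (renderB (R ++ (PySem.List.pyRange (min s1 e1) (max s1 e1 + 1) 1).map (fun yv => (s0, yv))) W H)
      = renderB ((R ++ (PySem.List.pyRange (min s1 e1) (max s1 e1 + 1) 1).map (fun yv => (s0, yv)))
          ++ (PySem.List.pyRange (min s0 e0) (max s0 e0 + 1) 1).map (fun xv => (xv, s1))) W H := by
    rw [← List.foldl_map (f := fun xv : Int => (xv, (s1 : Int)))
        (g := fun cv (p : Int × Int) => PySem.List.pySetD cv p.2 (PySem.List.pySetD (PySem.List.pyGetD cv p.2 []) p.1 "#"))]
    apply setcells_render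
    intro c hc
    obtain ⟨xv, hxv, rfl⟩ := List.mem_map.mp hc
    rw [PySem.List.mem_pyRange_one] at hxv
    refine ⟨by dsimp only; omega, by dsimp only; omega, hs1, by dsimp only; omega⟩
  rw [hrow, List.append_assoc]
  rfl


-- ---- the loop invariant: A's cave is the rendering of B's rock set ----

def InvP (R : PySem.Set (Int × Int)) (cave : List (List String)) : Prop :=
  cave = renderB R (mX R + 1) (mY R + 1) ∧ ∀ p ∈ R, 0 ≤ p.1 ∧ 0 ≤ p.2

theorem pair_step (R : PySem.Set (Int × Int)) (cave : List (List String)) (st en : List Int)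
    (hs0 : 0 ≤ PySem.List.pyGetD st 0 0) (hs1 : 0 ≤ PySem.List.pyGetD st 1 0)
    (he0 : 0 ≤ PySem.List.pyGetD en 0 0) (he1 : 0 ≤ PySem.List.pyGetD en 1 0)
    (hI : InvP R cave) : InvP (addSegmentB R st en) (fill_rock_formation cave st en) := by
  obtain ⟨hc, hnn⟩ := hI
  set s0 := PySem.List.pyGetD st 0 0
  set s1 := PySem.List.pyGetD st 1 0
  set e0 := PySem.List.pyGetD en 0 0
  set e1 := PySem.List.pyGetD en 1 0
  have hwh : mY R + 1 = 0 → mX R + 1 = 0 := by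
    intro h0
    have : mX R ≤ -1 := mX_le R (-1) (le_refl _) (fun p hp => by
      have := mY_mem_le R p hp
      have := (hnn p hp).2
      omega)
    have := neg_one_le_mX R
    omega
  have hfill := fill_render R (mX R + 1) (mY R + 1) st en
      (by have := neg_one_le_mX R; omega) (by have := neg_one_le_mY R; omega) hwh
      (fun p hp => ⟨by have := mX_mem_le R p hp; omega, by have := mY_mem_le R p hp; omega⟩)
      hs0 hs1 he0 he1
  have hmem : ∀ p, p ∈ (R ++ segCells s0 s1 e0 e1) ↔ p ∈ addSegmentB R st en :=
    fun p => (mem_addSegmentB R st en p).symm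
  have hmx : mX (addSegmentB R st en) = max (mX R) (max s0 e0) := by
    rw [mX_congr (addSegmentB R st en) (R ++ segCells s0 s1 e0 e1) (fun p => (hmem p).symm),
        mX_append_seg R s0 s1 e0 e1 hs0 hs1 he0 he1]
  have hmy : mY (addSegmentB R st en) = max (mY R) (max s1 e1) := by
    rw [mY_congr (addSegmentB R st en) (R ++ segCells s0 s1 e0 e1) (fun p => (hmem p).symm),
        mY_append_seg R s0 s1 e0 e1 hs0 hs1 he0 he1]
  constructor
  · rw [hc, hfill,
        renderB_congr (R ++ segCells s0 s1 e0 e1) (addSegmentB R st en) _ _ hmem,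
        show max (mX R + 1) (max s0 e0 + 1) = mX (addSegmentB R st en) + 1 by rw [hmx]; omega,
        show max (mY R + 1) (max s1 e1 + 1) = mY (addSegmentB R st en) + 1 by rw [hmy]; omega]
  · intro p hp
    rw [← hmem p] at hp
    rcases List.mem_append.mp hp with h1 | h2
    · exact hnn p h1
    · have := segCells_bounds s0 s1 e0 e1 hs0 hs1 he0 he1 p h2
      exact ⟨this.1.1, this.2.1⟩

-- ---- aligning A's index loop with B's zip loop ----

theorem zip_tail_eq {α : Type} (l : List α) (d : α) :
    l.zip l.tail = (List.range (l.length - 1)).map (fun k => (l.getD k d, l.getD (k+1) d)) := by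
  apply List.ext_getElem
  · simp [List.length_zip]
  · intro k hk1 hk2
    simp only [List.length_zip, List.length_tail, min_def] at hk1
    have hk : k < l.length - 1 := by split at hk1 <;> omega
    rw [List.getElem_zip, List.getElem_map, List.getElem_range]
    rw [List.getElem_tail, List.getD_eq_getElem l d (by omega), List.getD_eq_getElem l d (by omega)]

theorem foldA_conv (rf : List String) (cave : List (List String)) :
    (PySem.List.pyRange 0 (PySem.List.len rf - 1) 1).foldl
      (fun cv i => fill_rock_formation cv (parsePoint (PySem.List.pyGetD rf i ""))
        (parsePoint (PySem.List.pyGetD rf (i+1) ""))) cave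
    = (rf.zip rf.tail).foldl
      (fun cv q => fill_rock_formation cv (parsePoint q.1) (parsePoint q.2)) cave := by
  rw [PySem.List.pyRange_one, List.foldl_map, zip_tail_eq rf "", List.foldl_map]
  have e1 : ((PySem.List.len rf - 1) - 0).toNat = rf.length - 1 := by
    simp [PySem.List.len_eq]
  have hfun : (fun (cv : List (List String)) (k : Nat) =>
        fill_rock_formation cv (parsePoint (PySem.List.pyGetD rf (0 + (k : Int)) ""))
          (parsePoint (PySem.List.pyGetD rf ((0 + (k : Int)) + 1) "")))
      = (fun cv k => fill_rock_formation cv (parsePoint (rf.getD k ""))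
          (parsePoint (rf.getD (k+1) ""))) := by
    funext cv k
    have h2 : ((0:Int) + (k:Int)) = ((k : Nat) : Int) := by omega
    have h3 : ((k:Int) + 1) = (((k+1 : Nat)) : Int) := by push_cast; ring
    rw [h2, h3, PySem.List.pyGetD_natCast, PySem.List.pyGetD_natCast]
  rw [e1, hfun]

theorem foldB_conv (parts : List String) (R : PySem.Set (Int × Int)) :
    ((parts.map parsePoint).zip (parts.map parsePoint).tail).foldl
      (fun r se => addSegmentB r se.1 se.2) R
    = (parts.zip parts.tail).foldl
      (fun r q => addSegmentB r (parsePoint q.1) (parsePoint q.2)) R := by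
  rw [← List.map_tail, List.zip_map, List.foldl_map]
  simp [Prod.map]

theorem parse_nn (p : String)
    (hlen : 2 ≤ ((PySem.Str.split? p ",").getD []).length)
    (h0 : 0 ≤ (PySem.Int.ofStr? (PySem.List.pyGetD ((PySem.Str.split? p ",").getD []) 0 "")).getD 0)
    (h1 : 0 ≤ (PySem.Int.ofStr? (PySem.List.pyGetD ((PySem.Str.split? p ",").getD []) 1 "")).getD 0) :
    (0 ≤ PySem.List.pyGetD (parsePoint p) 0 0) ∧ (0 ≤ PySem.List.pyGetD (parsePoint p) 1 0) := by
  unfold parsePoint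
  constructor
  · rw [PySem.List.pyGetD_eq_getElem _ _ (by norm_num) (by simp; omega), List.getElem_map]
    rw [PySem.List.pyGetD_eq_getElem _ _ (by norm_num) (by simp; omega)] at h0
    exact h0
  · rw [PySem.List.pyGetD_eq_getElem _ _ (by norm_num) (by simp; omega), List.getElem_map]
    rw [PySem.List.pyGetD_eq_getElem _ _ (by norm_num) (by simp; omega)] at h1
    exact h1

theorem foldl_rel {α β γ : Type} (P : α → β → Prop) (f : α → γ → α) (g : β → γ → β) :
    ∀ (l : List γ) (a : α) (b : β),
      (∀ a' b' c, c ∈ l → P a' b' → P (f a' c) (g b' c)) → P a b → P (l.foldl f a) (l.foldl g b) := by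
  intro l
  induction l with
  | nil => intro a b _ h; simpa
  | cons c t ih =>
    intro a b hstep h
    simp only [List.foldl_cons]
    exact ih _ _ (fun a' b' c' hc' => hstep a' b' c' (by simp [hc'])) (hstep a b c (by simp) h)

theorem line_step (line : String) (R : PySem.Set (Int × Int)) (cave : List (List String))
    (hline : 2 ≤ ((PySem.Str.split? line " -> ").getD []).length →
      ∀ p ∈ (PySem.Str.split? line " -> ").getD [],
        (∀ t ∈ (PySem.Str.split? p ",").getD [], (PySem.Int.ofStr? t).isSome) ∧
        2 ≤ ((PySem.Str.split? p ",").getD []).length ∧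
        0 ≤ (PySem.Int.ofStr? (PySem.List.pyGetD ((PySem.Str.split? p ",").getD []) 0 "")).getD 0 ∧
        0 ≤ (PySem.Int.ofStr? (PySem.List.pyGetD ((PySem.Str.split? p ",").getD []) 1 "")).getD 0)
    (hI : InvP R cave) :
    InvP
      (if ((PySem.Str.split? line " -> ").getD []).length < 2 then R
       else ((((PySem.Str.split? line " -> ").getD []).map parsePoint).zip
              (((PySem.Str.split? line " -> ").getD []).map parsePoint).tail).foldl
            (fun r se => addSegmentB r se.1 se.2) R)
      ((PySem.List.pyRange 0 (PySem.List.len ((PySem.Str.split? line " -> ").getD []) - 1) 1).foldl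
        (fun cv i => fill_rock_formation cv
          (parsePoint (PySem.List.pyGetD ((PySem.Str.split? line " -> ").getD []) i ""))
          (parsePoint (PySem.List.pyGetD ((PySem.Str.split? line " -> ").getD []) (i+1) ""))) cave) := by
  set rf := (PySem.Str.split? line " -> ").getD [] with hrf
  by_cases h2 : rf.length < 2
  · rw [if_pos h2, PySem.List.pyRange_one_eq_nil (by simp [PySem.List.len_eq]; omega)]
    simpa using hI
  · rw [if_neg h2, foldA_conv, foldB_conv]
    apply foldl_rel (fun cv r => InvP r cv)
      (fun cv q => fill_rock_formation cv (parsePoint q.1) (parsePoint q.2))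
      (fun r q => addSegmentB r (parsePoint q.1) (parsePoint q.2))
      (rf.zip rf.tail) cave R
    · intro cv r q hq hP
      obtain ⟨a, b⟩ := q
      obtain ⟨ha, hb⟩ := List.of_mem_zip hq
      have hc1 := hline (by omega) a ha
      have hc2 := hline (by omega) b (List.mem_of_mem_tail hb)
      have hp1 := parse_nn a hc1.2.1 hc1.2.2.1 hc1.2.2.2
      have hp2 := parse_nn b hc2.2.1 hc2.2.2.1 hc2.2.2.2
      exact pair_step r cv (parsePoint a) (parsePoint b) hp1.1 hp1.2 hp2.1 hp2.2 hP
    · exact hI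

theorem inv_empty : InvP PySem.Set.empty ([] : List (List String)) :=
  ⟨rfl, by intro p hp; simp [PySem.Set.empty] at hp⟩

-- ===== VERDICT (by name: the statement is the Claim_ definition above) =====
set_option maxHeartbeats 2000000 in
theorem inv_after_lines (lines : List String)
    (hpre : ∀ line ∈ lines, 2 ≤ ((PySem.Str.split? line " -> ").getD []).length →
      ∀ p ∈ (PySem.Str.split? line " -> ").getD [],
        (∀ t ∈ (PySem.Str.split? p ",").getD [], (PySem.Int.ofStr? t).isSome) ∧
        2 ≤ ((PySem.Str.split? p ",").getD []).length ∧
        0 ≤ (PySem.Int.ofStr? (PySem.List.pyGetD ((PySem.Str.split? p ",").getD []) 0 "")).getD 0 ∧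
        0 ≤ (PySem.Int.ofStr? (PySem.List.pyGetD ((PySem.Str.split? p ",").getD []) 1 "")).getD 0) :
    InvP
      (lines.foldl (fun rocks line =>
        if ((PySem.Str.split? line " -> ").getD []).length < 2 then rocks
        else ((((PySem.Str.split? line " -> ").getD []).map parsePoint).zip
               (((PySem.Str.split? line " -> ").getD []).map parsePoint).tail).foldl
             (fun r se => addSegmentB r se.1 se.2) rocks) PySem.Set.empty)
      (lines.foldl (fun cave line =>
        (PySem.List.pyRange 0 (PySem.List.len ((PySem.Str.split? line " -> ").getD []) - 1) 1).foldl
          (fun cave i => fill_rock_formation cave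
            (parsePoint (PySem.List.pyGetD ((PySem.Str.split? line " -> ").getD []) i ""))
            (parsePoint (PySem.List.pyGetD ((PySem.Str.split? line " -> ").getD []) (i+1) ""))) cave) []) := by
  exact foldl_rel (fun (cv : List (List String)) (r : PySem.Set (Int × Int)) => InvP r cv)
      _ _ lines [] PySem.Set.empty
      (fun cv r line hmem hP => line_step line r cv (hpre line hmem) hP)
      inv_empty

set_option maxHeartbeats 2000000 in
theorem load_cave_spec : Claim_equal_load_cave := by
  intro lines ab hdom hpre
  unfold Spec_load_cave load_cave load_cave_alt
  dsimp only
  have hInv := inv_after_lines lines (fun line hmem => hpre line hmem)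
  obtain ⟨hcv, hnn⟩ := hInv
  cases ab with
  | false =>
    rw [if_neg (by simp)]
    by_cases hemp : (lines.foldl
        (fun rocks line =>
          if ((PySem.Str.split? line " -> ").getD []).length < 2 then rocks
          else ((((PySem.Str.split? line " -> ").getD []).map parsePoint).zip
                 (((PySem.Str.split? line " -> ").getD []).map parsePoint).tail).foldl
               (fun r se => addSegmentB r se.1 se.2) rocks)
        PySem.Set.empty).isEmpty
    · rw [if_pos (by rw [Bool.not_false, Bool.and_true]; exact hemp)]
      rw [hcv, List.isEmpty_iff.mp hemp]
      rfl
    · rw [if_neg (by rw [Bool.not_false, Bool.and_true]; exact hemp), if_neg (by simp)]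
      exact hcv
  | true =>
    rw [if_pos rfl, if_neg (by rw [Bool.not_true, Bool.and_false]; exact Bool.false_ne_true), if_pos rfl]
    set RB := (lines.foldl
        (fun rocks line =>
          if ((PySem.Str.split? line " -> ").getD []).length < 2 then rocks
          else ((((PySem.Str.split? line " -> ").getD []).map parsePoint).zip
                 (((PySem.Str.split? line " -> ").getD []).map parsePoint).tail).foldl
               (fun r se => addSegmentB r se.1 se.2) rocks)
        PySem.Set.empty) with hRB
    have hH0 : 0 ≤ mY RB + 1 := by have := neg_one_le_mY RB; omega
    have hlenCV : PySem.List.len (lines.foldl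
        (fun cave line =>
          (PySem.List.pyRange 0 (PySem.List.len ((PySem.Str.split? line " -> ").getD []) - 1) 1).foldl
            (fun cave i => fill_rock_formation cave
              (parsePoint (PySem.List.pyGetD ((PySem.Str.split? line " -> ").getD []) i ""))
              (parsePoint (PySem.List.pyGetD ((PySem.Str.split? line " -> ").getD []) (i+1) ""))) cave)
        []) = mY RB + 1 := by
      rw [hcv, PySem.List.len_eq, renderB_length, Int.toNat_of_nonneg hH0]
    rw [hlenCV, hcv]
    set H := mY RB + 1 with hHdef
    have hwpos : 0 ≤ mX RB + 1 := by have := neg_one_le_mX RB; omega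
    have hwh : H = 0 → mX RB + 1 = 0 := by
      intro h0
      have : mX RB ≤ -1 := mX_le RB (-1) (le_refl _) (fun p hp => by
        have := mY_mem_le RB p hp
        have := (hnn p hp).2
        omega)
      have := neg_one_le_mX RB
      omega
    have g00 : PySem.List.pyGetD [(0:Int), H+1] 0 0 = 0 := rfl
    have g01 : PySem.List.pyGetD [(0:Int), H+1] 1 0 = H + 1 := rfl
    have g10 : PySem.List.pyGetD [(1000:Int), H+1] 0 0 = 1000 := rfl
    have g11 : PySem.List.pyGetD [(1000:Int), H+1] 1 0 = H + 1 := rfl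
    have hfr := fill_render RB (mX RB + 1) H [0, H+1] [1000, H+1] hwpos hH0 hwh
        (fun p hp => ⟨by have := mX_mem_le RB p hp; omega,
                      by have := mY_mem_le RB p hp; omega⟩)
        (by rw [g00]) (by rw [g01]; omega) (by rw [g10]; omega) (by rw [g11]; omega)
    rw [g00, g01, g10, g11] at hfr
    rw [hfr]
    have hc2 : ∀ p : Int × Int, p ∈ RB ++ segCells 0 (H+1) 1000 (H+1)
        ↔ p ∈ (PySem.List.pyRange 0 1001 1).foldl (fun r x => PySem.Set.add r (x, H+1)) RB := by
      intro p
      rw [PySem.Set.mem_foldl_add, List.mem_append]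
      constructor
      · rintro (h | h)
        · exact Or.inl h
        · right
          rcases List.mem_append.mp h with hcol | hrow
          · obtain ⟨yv, hyv, hew⟩ := List.mem_map.mp hcol
            rw [PySem.List.mem_pyRange_one] at hyv
            refine ⟨0, by rw [PySem.List.mem_pyRange_one]; omega, ?_⟩
            rw [← hew]
            have : yv = H + 1 := by omega
            rw [this]
          · obtain ⟨xv, hxv, hew⟩ := List.mem_map.mp hrow
            rw [PySem.List.mem_pyRange_one] at hxv
            refine ⟨xv, by rw [PySem.List.mem_pyRange_one]; omega, by rw [← hew]⟩
      · rintro (h | ⟨b, hb, rfl⟩)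
        · exact Or.inl h
        · right
          apply List.mem_append_right
          rw [PySem.List.mem_pyRange_one] at hb
          exact List.mem_map.mpr ⟨b, by rw [PySem.List.mem_pyRange_one]; omega, rfl⟩
    rw [renderB_congr _ _ _ _ hc2,
        show max (mX RB + 1) (max (0:Int) 1000 + 1) = max (mX RB + 1) 1001 by norm_num,
        show max H (max (H+1) (H+1) + 1) = H + 2 by omega]
    rfl
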